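-- pv_equiv track=rewrite | github.com/Vortexblaster/password-generator | passwordvalidate.py | character_type_position
-- ===== SOURCE A (Python) =====
-- def character_type_position(password):
--     """ Determines the occurance of 4 types of characters: uppercase and lowercase letters, digits, and special characters
--
--     Arguments:
--         password (list): a list of characters
--
--     Returns:
--         character_position (list): a list that contains the index of the most recent occurance of a given type of character, storing None if no such type is found.
--     """
--     character_position = [None] * 4
--     special_characters = "!-$%&'()*+,./:;<=>?_[]^`{|}~"
--
--     for i in range(len(password)):
--         character_position[0] = i if password[i].isupper() else character_position[0]                       #0 is uppercase
--         character_position[1] = i if password[i].islower() else character_position[1]                       #1 is lowercase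
--         character_position[2] = i if password[i].isdigit() else character_position[2]                       #2 is digits
--         character_position[3] = i if password[i] in special_characters else character_position[3]           #3 is special
--
--     return character_position
-- ===== SOURCE B (Python) =====
-- def character_type_position(password):
--     special_characters = "!-$%&'()*+,./:;<=>?_[]^`{|}~"
--     tests = [str.isupper, str.islower, str.isdigit,
--              lambda ch: ch in special_characters]
--     return [max((i for i, ch in enumerate(password) if t(ch)), default=None)
--             for t in tests]
-- ===== Notes on version B (the rewrite author's own statement) =====
-- stated objective: simpler
-- what changed: Replaces the single combined index loop mutating a 4-slot array with four independent max-over-filtered-enumerate reductions (last occurrence = largest matching index, default None).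
import Mathlib
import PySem

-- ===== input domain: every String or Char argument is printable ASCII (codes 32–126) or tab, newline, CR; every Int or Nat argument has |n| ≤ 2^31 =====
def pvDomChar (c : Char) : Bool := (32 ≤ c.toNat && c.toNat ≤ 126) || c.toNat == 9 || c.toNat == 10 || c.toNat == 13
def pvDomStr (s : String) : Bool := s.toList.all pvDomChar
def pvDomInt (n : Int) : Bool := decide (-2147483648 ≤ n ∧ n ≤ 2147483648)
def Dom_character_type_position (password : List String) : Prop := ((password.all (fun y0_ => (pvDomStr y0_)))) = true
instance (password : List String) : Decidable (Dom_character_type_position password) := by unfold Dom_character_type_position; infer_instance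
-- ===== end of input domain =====

-- B is a different decomposition: four independent max-over-filtered-enumerate reductions
-- instead of A's single combined loop mutating a 4-slot array; same cost, plainer per-slot logic.

-- shared primitive ports of Python's str.isupper / str.islower (exact on the ASCII domain:
-- at least one cased (= alphabetic) character and no lowercase / no uppercase one)
def pyStrIsupper (s : String) : Bool :=
  s.toList.any PySem.Chars.isalpha && s.toList.all (fun c => !PySem.Chars.islower c)
def pyStrIslower (s : String) : Bool :=
  s.toList.any PySem.Chars.isalpha && s.toList.all (fun c => !PySem.Chars.isupper c)

-- ===== PORT A =====
-- A: one pass over the indices, each of the four slots conditionally overwritten in place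
def character_type_position (password : List String) : List (Option Int) :=
  match (PySem.List.enumerate password).foldl
    (fun (cp : Option Int × Option Int × Option Int × Option Int) ic =>
      (if pyStrIsupper ic.2 then some ic.1 else cp.1,
       if pyStrIslower ic.2 then some ic.1 else cp.2.1,
       if PySem.Str.strIsdigit ic.2 then some ic.1 else cp.2.2.1,
       if PySem.Str.isIn ic.2 "!-$%&'()*+,./:;<=>?_[]^`{|}~" then some ic.1 else cp.2.2.2))
    (none, none, none, none) with
  | (a, b, c, d) => [a, b, c, d]

-- ===== PORT B =====
-- max((i for i, ch in enumerate(password) if t(ch)), default=None);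
-- Python's max on a nonempty sequence is the running-max fold (PYSEM: max?_id_cons)
def lastIdx (t : String → Bool) (password : List String) : Option Int :=
  match ((PySem.List.enumerate password).filter (fun ic => t ic.2)).map (fun ic => ic.1) with
  | [] => none
  | a :: tl => some (tl.foldl max a)

def character_type_position_alt (password : List String) : List (Option Int) :=
  [lastIdx pyStrIsupper password,
   lastIdx pyStrIslower password,
   lastIdx PySem.Str.strIsdigit password,
   lastIdx (fun ch => PySem.Str.isIn ch "!-$%&'()*+,./:;<=>?_[]^`{|}~") password]

-- ===== PRECONDITION & SPEC =====
def Spec_character_type_position (password : List String) (out : List (Option Int)) : Prop := out = character_type_position_alt password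
instance (password : List String) (out : List (Option Int)) : Decidable (Spec_character_type_position password out) := by unfold Spec_character_type_position; infer_instance

-- ===== CLAIM (what is proved, stated in full; the proofs are below) =====
def Claim_equal_character_type_position : Prop := ∀ (password : List String), Dom_character_type_position password → Spec_character_type_position password (character_type_position password)

-- ===== LEMMAS AND PROOFS =====

-- A's one-predicate fold keeps the LAST matching index
theorem foldl_last {α : Type} (p : Int × α → Bool) (l : List (Int × α)) (a0 : Option Int) :
    l.foldl (fun a ic => if p ic then some ic.1 else a) a0
      = (((l.filter p).map (fun ic => ic.1)).getLast?).elim a0 some := by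
  induction l using List.reverseRecOn generalizing a0 with
  | nil => simp
  | append_singleton l x ih =>
      by_cases hx : p x <;>
        simp [List.foldl_append, List.filter_append, hx, ih]

-- on a strictly increasing nonempty list, the running max IS the last element
theorem chain_max (a : Int) (tl : List Int) (h : (a :: tl).Pairwise (· < ·)) :
    some (tl.foldl max a) = (a :: tl).getLast? := by
  induction tl generalizing a with
  | nil => rfl
  | cons b tl' ih =>
      have hab : a < b := (List.pairwise_cons.1 h).1 b (by simp)
      have h' : (b :: tl').Pairwise (· < ·) := (List.pairwise_cons.1 h).2
      have := ih b h'
      simp only [List.foldl_cons] at this ⊢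
      rw [max_eq_right hab.le]
      simpa using this

theorem lastIdx_eq_fold (t : String → Bool) (password : List String) :
    lastIdx t password
      = (PySem.List.enumerate password).foldl
          (fun a ic => if t ic.2 then some ic.1 else a) none := by
  have hp : (((PySem.List.enumerate password).filter (fun ic => t ic.2)).map
      (fun ic => ic.1)).Pairwise (· < ·) := by
    rw [List.pairwise_map]
    exact List.Pairwise.sublist (List.filter_sublist) (PySem.List.pairwise_lt_enumerate password 0)
  rw [foldl_last (fun ic => t ic.2), lastIdx]
  generalize hg : ((PySem.List.enumerate password).filter (fun ic => t ic.2)).map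
      (fun ic => ic.1) = ms at hp ⊢
  cases ms with
  | nil => rfl
  | cons a tl =>
      rw [← chain_max a tl hp]
      rfl

-- a product fold with componentwise-independent updates splits into four folds
theorem foldl_prod4 {α : Type} (f1 f2 f3 f4 : Option Int → α → Option Int)
    (l : List α) (a b c d : Option Int) :
    l.foldl (fun (cp : Option Int × Option Int × Option Int × Option Int) x =>
        (f1 cp.1 x, f2 cp.2.1 x, f3 cp.2.2.1 x, f4 cp.2.2.2 x)) (a, b, c, d)
      = (l.foldl f1 a, l.foldl f2 b, l.foldl f3 c, l.foldl f4 d) := by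
  induction l generalizing a b c d with
  | nil => rfl
  | cons x tl ih => simp [List.foldl_cons, ih]

-- ===== VERDICT (by name: the statement is the Claim_ definition above) =====
theorem character_type_position_spec : Claim_equal_character_type_position := by
  intro password _
  show character_type_position password = character_type_position_alt password
  unfold character_type_position character_type_position_alt
  rw [foldl_prod4
    (fun (a : Option Int) (ic : Int × String) => if pyStrIsupper ic.2 then some ic.1 else a)
    (fun (a : Option Int) (ic : Int × String) => if pyStrIslower ic.2 then some ic.1 else a)
    (fun (a : Option Int) (ic : Int × String) => if PySem.Str.strIsdigit ic.2 then some ic.1 else a)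
    (fun (a : Option Int) (ic : Int × String) => if PySem.Str.isIn ic.2 "!-$%&'()*+,./:;<=>?_[]^`{|}~" then some ic.1 else a)
    (PySem.List.enumerate password) none none none none]
  simp only [lastIdx_eq_fold]
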